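-- pv_equiv track=rewrite | github.com/ASSERT-KTH/Mokav | experiments/pynguin/c4b/return-lst/generated_tests/src_479/7/src_479.py | func
-- ===== SOURCE A (Python) =====
-- def func(*args):
-- 	ret_values = []
--
-- 	from sys import stdin, stdout
-- 	inp = args[0]
-- 	stack = []
-- 	string = list(args[1])
-- 	stack.append('z')
-- 	count = 0
-- 	for i in string:
-- 	    if (stack[(- 1)] == i):
-- 	        count += 1
-- 	    else:
-- 	        stack.append(i)
-- 	ret_values.append(count)
--
-- 	return ret_values
-- ===== SOURCE B (Python) =====
-- def func(*args):
--     t = 'z' + args[1]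
--
--     def rec(s):
--         # divide and conquer: adjacent-equal pairs = pairs in each half + boundary pair
--         n = len(s)
--         if n < 2:
--             return 0
--         m = n // 2
--         return rec(s[:m]) + rec(s[m:]) + (s[m - 1] == s[m])
--
--     return [rec(t)]
-- ===== Notes on version B (the rewrite author's own statement) =====
-- stated objective: alternative
-- what changed: Replaced A's linear stateful stack-top-comparison loop by a divide-and-conquer recursion on the 'z'-padded string: the adjacent-equal-pair count of a string is the sum of the counts of its two halves plus the boundary comparison.
import Mathlib
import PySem

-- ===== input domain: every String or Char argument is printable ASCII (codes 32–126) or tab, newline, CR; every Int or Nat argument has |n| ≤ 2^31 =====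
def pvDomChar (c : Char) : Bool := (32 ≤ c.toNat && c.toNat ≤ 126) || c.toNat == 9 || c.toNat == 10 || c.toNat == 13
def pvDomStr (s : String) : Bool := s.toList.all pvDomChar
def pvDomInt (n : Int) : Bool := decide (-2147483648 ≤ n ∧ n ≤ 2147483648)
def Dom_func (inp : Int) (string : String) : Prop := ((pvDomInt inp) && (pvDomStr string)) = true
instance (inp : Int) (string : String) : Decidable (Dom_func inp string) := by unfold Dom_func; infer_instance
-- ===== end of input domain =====

-- B replaces A's linear stateful stack-top-comparison loop by a divide-and-conquer
-- recursion on the 'z'-padded string (objective: alternative, same cost).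

-- ===== PORT A =====
-- loop body: state = (stack, count); 'stack[-1] == i' via pyGet? (stack never empty)
def funcLoop (state : List Char × Int) (i : Char) : List Char × Int :=
  if PySem.List.pyGet? state.1 (-1) = some i then (state.1, state.2 + 1)
  else (state.1 ++ [i], state.2)

def func (inp : Int) (string : String) : List Int :=
  let stack : List Char := [] ++ ['z']
  let count : Int := 0
  let final := string.toList.foldl funcLoop (stack, count)
  ([] : List Int) ++ [final.2]

-- ===== PORT B =====
-- rec: if len < 2 then 0 else rec(s[:m]) + rec(s[m:]) + (s[m-1] == s[m]), m = len // 2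
def funcRec (s : List Char) : Int :=
  if s.length < 2 then 0
  else
    let m := s.length / 2
    funcRec (s.take m) + funcRec (s.drop m) + (if s[m-1]? = s[m]? then 1 else 0)
termination_by s.length
decreasing_by
  · simp only [List.length_take]; omega
  · simp only [List.length_drop]; omega

def func_alt (inp : Int) (string : String) : List Int :=
  let t := 'z' :: string.toList
  [funcRec t]

-- ===== PRECONDITION & SPEC =====
def Spec_func (inp : Int) (string : String) (out : List Int) : Prop := out = func_alt inp string
instance (inp : Int) (string : String) (out : List Int) : Decidable (Spec_func inp string out) := by unfold Spec_func; infer_instance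

-- ===== CLAIM (what is proved, stated in full; the proofs are below) =====
def Claim_equal_func : Prop := ∀ (inp : Int) (string : String), Dom_func inp string → Spec_func inp string (func inp string)

-- ===== LEMMAS AND PROOFS =====

-- reference count: adjacent-equal pairs with previous char prev
def adjCount (prev : Char) : List Char → Int
  | [] => 0
  | c :: l => (if c = prev then 1 else 0) + adjCount c l

-- number of adjacent equal pairs of a list (no sentinel)
def pairs : List Char → Int
  | [] => 0
  | [_] => 0
  | a :: b :: l => (if a = b then 1 else 0) + pairs (b :: l)

-- A-side: the loop's count equals acc + adjCount, for any stack ending in prev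
theorem funcLoop_spec (l : List Char) : ∀ (st : List Char) (prev : Char) (acc : Int),
    (l.foldl funcLoop (st ++ [prev], acc)).2 = acc + adjCount prev l := by
  induction l with
  | nil => intro st prev acc; simp [adjCount]
  | cons c l ih =>
    intro st prev acc
    have hget : PySem.List.pyGet? (st ++ [prev]) (-1) = some prev := by
      simp [PySem.List.pyGet?, PySem.List.pyIdx?]
    simp only [List.foldl_cons, funcLoop, hget, Option.some.injEq, adjCount]
    by_cases h : prev = c
    · subst h
      rw [if_pos rfl, if_pos rfl, ih st prev (acc + 1)]; ring
    · rw [if_neg h, if_neg (fun hh => h hh.symm)]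
      rw [ih (st ++ [prev]) c acc]
      ring

theorem adjCount_eq_pairs (l : List Char) : ∀ prev, adjCount prev l = pairs (prev :: l) := by
  induction l with
  | nil => intro prev; simp [adjCount, pairs]
  | cons c l ih =>
    intro prev
    simp only [adjCount, pairs, ih c]
    by_cases h : c = prev
    · subst h; simp
    · rw [if_neg h, if_neg (fun hh => h hh.symm)]

-- pairs is additive under concatenation plus the boundary comparison
theorem pairs_append (u v : List Char) (hu : u ≠ []) (hv : v ≠ []) :
    pairs (u ++ v) = pairs u + pairs v + (if u.getLast? = v.head? then 1 else 0) := by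
  induction u with
  | nil => exact absurd rfl hu
  | cons a u ih =>
    cases u with
    | nil =>
      cases v with
      | nil => exact absurd rfl hv
      | cons b v =>
        simp only [List.cons_append, List.nil_append, pairs, List.getLast?_singleton,
          List.head?_cons, Option.some.injEq]
        ring
    | cons a' u' =>
      have h := ih (by simp)
      simp only [List.cons_append, pairs] at h ⊢
      rw [h]
      have : (a :: a' :: u').getLast? = (a' :: u').getLast? := by
        simp [List.getLast?_cons_cons]
      rw [this]
      ring

-- B-side: funcRec computes pairs
theorem funcRec_eq_pairs (s : List Char) : funcRec s = pairs s := by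
  induction s using funcRec.induct with
  | case1 s h =>
    rw [funcRec, if_pos h]
    match s, h with
    | [], _ => rfl
    | [_], _ => rfl
  | case2 s h m ih1 ih2 =>
    rw [funcRec, if_neg h]
    show funcRec (s.take m) + funcRec (s.drop m) + (if s[m-1]? = s[m]? then 1 else 0) = pairs s
    rw [ih1, ih2]
    have hm1 : 1 ≤ m := by omega
    have hmlt : m < s.length := by omega
    have htake : s.take m ≠ [] := by
      intro hc; have := congrArg List.length hc
      simp only [List.length_take, List.length_nil] at this; omega
    have hdrop : s.drop m ≠ [] := by
      intro hc; have := congrArg List.length hc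
      simp only [List.length_drop, List.length_nil] at this; omega
    rw [← List.take_append_drop m s]
    conv_lhs => rw [List.take_append_drop]
    rw [pairs_append (s.take m) (s.drop m) htake hdrop]
    congr 1
    have hlast : (s.take m).getLast? = s[m-1]? := by
      rw [List.getLast?_eq_getElem?]
      simp only [List.length_take]
      rw [List.getElem?_take, if_pos (by omega)]
      congr 1
      omega
    have hhead : (s.drop m).head? = s[m]? := by
      rw [List.head?_eq_getElem?, List.getElem?_drop, Nat.add_zero]
    rw [hlast, hhead]

-- ===== VERDICT (by name: the statement is the Claim_ definition above) =====
theorem func_spec : Claim_equal_func := by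
  intro inp string _
  unfold Spec_func func func_alt
  have hA := funcLoop_spec string.toList [] 'z' 0
  simp only [List.nil_append] at hA ⊢
  rw [hA, funcRec_eq_pairs, ← adjCount_eq_pairs]
  simp
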